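-- pv_equiv track=rewrite | github.com/gkastanis/drupal-workflow | scripts/session-analysis/analyze-replays.py | group_by_session
-- ===== SOURCE A (Python) =====
-- def group_by_session(entries):
--     """Group intervention entries into sessions by detecting turn resets.
--
--     The autopilot appends all interventions for all sessions to a single file.
--     A new session starts when the turn number drops below the previous entry's turn.
--     """
--     sessions = []
--     current = []
--     prev_turn = -1
--     for entry in entries:
--         turn = entry.get("turn", 0)
--         if turn < prev_turn and current:
--             sessions.append(current)
--             current = []
--         current.append(entry)
--         prev_turn = turn
--     if current:
--         sessions.append(current)
--     return sessions
-- ===== SOURCE B (Python) =====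
-- def group_by_session(entries):
--     """Group intervention entries into sessions by detecting turn resets.
--
--     Builds the result back-to-front: walk the entries in reverse, prepending
--     each entry to the following session when its turn does not exceed that
--     session's first turn, and opening a new session otherwise.
--     """
--     sessions = []
--     for entry in reversed(list(entries)):
--         if sessions and entry.get("turn", 0) <= sessions[0][0].get("turn", 0):
--             sessions[0] = [entry] + sessions[0]
--         else:
--             sessions = [[entry]] + sessions
--     return sessions
-- ===== Notes on version B (the rewrite author's own statement) =====
-- stated objective: alternative
-- what changed: B drops A's sessions/current/prev_turn accumulator machinery and instead walks the entries in reverse, building the session list back-to-front by either prepending the entry to the following session (turn <= that session's first turn) or opening a new session.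
import Mathlib
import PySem

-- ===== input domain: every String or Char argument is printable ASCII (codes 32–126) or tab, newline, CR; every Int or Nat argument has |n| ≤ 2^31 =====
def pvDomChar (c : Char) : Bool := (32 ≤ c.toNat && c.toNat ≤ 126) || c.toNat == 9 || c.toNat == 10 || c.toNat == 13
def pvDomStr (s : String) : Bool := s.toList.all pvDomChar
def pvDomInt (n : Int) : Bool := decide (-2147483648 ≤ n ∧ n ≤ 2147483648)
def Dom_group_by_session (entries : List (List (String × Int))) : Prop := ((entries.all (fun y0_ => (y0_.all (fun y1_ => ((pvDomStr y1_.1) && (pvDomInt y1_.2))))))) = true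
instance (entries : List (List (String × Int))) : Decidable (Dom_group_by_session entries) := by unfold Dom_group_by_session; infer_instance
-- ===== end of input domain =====

-- B builds the sessions back-to-front in a single reverse pass (no current-buffer/prev_turn state); alternative decomposition, same cost.

-- shared helper: entry.get("turn", 0)
def pvTurn (entry : List (String × Int)) : Int := (PySem.Dict.mk entry).getD "turn" 0

-- ===== PORT A =====
-- A-side helper: the loop body, state (sessions, current, prev_turn)
def pvStepA (st : List (List (List (String × Int))) × List (List (String × Int)) × Int)
    (entry : List (String × Int)) :
    List (List (List (String × Int))) × List (List (String × Int)) × Int :=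
  let turn := pvTurn entry
  let p := if turn < st.2.2 ∧ st.2.1 ≠ [] then (st.1 ++ [st.2.1], ([] : List (List (String × Int))))
           else (st.1, st.2.1)
  (p.1, p.2 ++ [entry], turn)

-- forward loop, state (sessions, current, prev_turn); 'current' truthiness = current ≠ []
def group_by_session (entries : List (List (String × Int))) : List (List (List (String × Int))) :=
  let fin := entries.foldl pvStepA ([], [], -1)
  if fin.2.1 ≠ [] then fin.1 ++ [fin.2.1] else fin.1

-- ===== PORT B =====
-- loop over reversed(entries); sessions[0] is always nonempty, so the '(h :: s) :: ss'
-- pattern covers every reachable truthy 'sessions'; the '_' branch is the falsy case.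
def group_by_session_alt (entries : List (List (String × Int))) : List (List (List (String × Int))) :=
  entries.reverse.foldl
    (fun (sessions : List (List (List (String × Int)))) entry =>
      match sessions with
      | (h :: s) :: ss =>
        if pvTurn entry ≤ pvTurn h then ([entry] ++ (h :: s)) :: ss
        else [[entry]] ++ ((h :: s) :: ss)
      | _ => [[entry]] ++ sessions)
    []

-- ===== PRECONDITION & SPEC =====
def Spec_group_by_session (entries : List (List (String × Int))) (out : List (List (List (String × Int)))) : Prop := out = group_by_session_alt entries
instance (entries : List (List (String × Int))) (out : List (List (List (String × Int)))) : Decidable (Spec_group_by_session entries out) := by unfold Spec_group_by_session; infer_instance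

-- ===== CLAIM (what is proved, stated in full; the proofs are below) =====
def Claim_equal_group_by_session : Prop := ∀ (entries : List (List (String × Int))), Dom_group_by_session entries → Spec_group_by_session entries (group_by_session entries)

-- ===== LEMMAS AND PROOFS =====

-- B's step function, named for the proofs
def pvStepB (sessions : List (List (List (String × Int)))) (entry : List (String × Int)) :
    List (List (List (String × Int))) :=
  match sessions with
  | (h :: s) :: ss =>
    if pvTurn entry ≤ pvTurn h then ([entry] ++ (h :: s)) :: ss
    else [[entry]] ++ ((h :: s) :: ss)
  | _ => [[entry]] ++ sessions

-- B as a right fold (chunks built back-to-front)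
def pvChunks (l : List (List (String × Int))) : List (List (List (String × Int))) :=
  l.foldr (fun e acc => pvStepB acc e) []

theorem alt_eq_chunks (l : List (List (String × Int))) :
    group_by_session_alt l = pvChunks l := by
  simp [group_by_session_alt, pvChunks, List.foldl_reverse, pvStepB]

-- A's loop tail, abstracted: what the forward loop produces from a nonempty 'current'
-- run whose last turn is 'prev'
def pvGlue (c : List (List (String × Int))) (prev : Int) :
    List (List (String × Int)) → List (List (List (String × Int)))
  | [] => [c]
  | e :: rest =>
    if pvTurn e < prev then c :: pvGlue [e] (pvTurn e) rest
    else pvGlue (c ++ [e]) (pvTurn e) rest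

-- the first chunk of pvChunks (e :: l) starts with e
theorem chunks_cons_shape (l : List (List (String × Int))) (e : List (String × Int)) :
    ∃ s ss, pvChunks (e :: l) = (e :: s) :: ss := by
  induction l generalizing e with
  | nil => exact ⟨[], [], rfl⟩
  | cons x l' ih =>
    obtain ⟨s, ss, hx⟩ := ih x
    show ∃ s ss, pvStepB (pvChunks (x :: l')) e = _
    rw [hx]
    by_cases h : pvTurn e ≤ pvTurn x
    · exact ⟨x :: s, ss, by simp [pvStepB, h]⟩
    · exact ⟨[], (x :: s) :: ss, by simp [pvStepB, h]⟩

-- glue of a run ending in e equals the chunks of (e :: l) with the run's prefix c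
-- prepended onto the first chunk
theorem glue_eq_chunks (l : List (List (String × Int))) (c : List (List (String × Int)))
    (e : List (String × Int)) :
    pvGlue (c ++ [e]) (pvTurn e) l =
      (match pvChunks (e :: l) with
       | s :: ss => (c ++ s) :: ss
       | [] => []) := by
  induction l generalizing c e with
  | nil => simp [pvGlue, pvChunks, pvStepB]
  | cons n rest ih =>
    obtain ⟨s, ss, hn⟩ := chunks_cons_shape rest n
    have hcons : pvChunks (e :: n :: rest) = pvStepB (pvChunks (n :: rest)) e := rfl
    by_cases h : pvTurn n < pvTurn e
    · have h' : ¬ pvTurn e ≤ pvTurn n := by omega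
      have h1 : pvGlue [n] (pvTurn n) rest = pvChunks (n :: rest) := by
        have := ih [] n; simpa [hn] using this
      rw [hcons, hn]
      simp [pvGlue, h, h1, hn, pvStepB, h']
    · have h' : pvTurn e ≤ pvTurn n := by omega
      have h2 := ih (c ++ [e]) n
      rw [hcons, hn]
      simp only [pvGlue, if_neg h]
      rw [show c ++ [e] ++ [n] = (c ++ [e]) ++ [n] from rfl] at *
      rw [h2, hn]
      simp [pvStepB, h']

-- A's forward loop with a nonempty current run produces sessions ++ glue
theorem loopA_eq_glue (l : List (List (String × Int)))
    (sessions : List (List (List (String × Int)))) (c : List (List (String × Int)))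
    (prev : Int) (hc : c ≠ []) :
    (let fin := l.foldl pvStepA (sessions, c, prev)
     if fin.2.1 ≠ [] then fin.1 ++ [fin.2.1] else fin.1) = sessions ++ pvGlue c prev l := by
  induction l generalizing sessions c prev with
  | nil => simp [pvGlue, hc]
  | cons e rest ih =>
    simp only [List.foldl_cons]
    by_cases h : pvTurn e < prev
    · have hstep : pvStepA (sessions, c, prev) e = (sessions ++ [c], [e], pvTurn e) := by
        simp [pvStepA, h, hc]
      rw [hstep, ih (sessions ++ [c]) [e] (pvTurn e) (by simp), pvGlue, if_pos h,
        List.append_assoc]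
      rfl
    · have hstep : pvStepA (sessions, c, prev) e = (sessions, c ++ [e], pvTurn e) := by
        simp [pvStepA, h]
      rw [hstep, ih sessions (c ++ [e]) (pvTurn e) (by simp), pvGlue, if_neg h]

-- ===== VERDICT (by name: the statement is the Claim_ definition above) =====
theorem group_by_session_spec : Claim_equal_group_by_session := by
  intro entries _
  show group_by_session entries = group_by_session_alt entries
  cases entries with
  | nil => rfl
  | cons e rest =>
    have h0 : group_by_session (e :: rest) = pvGlue [e] (pvTurn e) rest := by
      have hstep : pvStepA ([], [], -1) e = ([], [e], pvTurn e) := by simp [pvStepA]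
      have := loopA_eq_glue rest [] [e] (pvTurn e) (by simp)
      unfold group_by_session
      simp only [List.foldl_cons, hstep]
      simpa using this
    obtain ⟨s, ss, hs⟩ := chunks_cons_shape rest e
    have := glue_eq_chunks rest [] e
    rw [alt_eq_chunks, h0]
    simpa [hs] using this
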